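-- pv_equiv track=rewrite | github.com/parklab/HiNT | HiNT/getBPfromChimericReads.py | singleSide_clip_pos_calculation
-- ===== SOURCE A (Python) =====
-- def singleSide_clip_pos_calculation(m_clip_pos_forward,m_clip_pos_reverse,window_size=10):
-- 	#clip_pos_a and clip_pos_b will be validated only when reads that chimeric in chr1~chr8 has such clip pos, and reads that chimeric in chr8~chr1 have such clip position too.
-- 	clip_Pos_statistics = {}
--
-- 	forward_keys = list(m_clip_pos_forward.keys())
-- 	reverse_keys = list(m_clip_pos_reverse.keys())
-- 	for i in range(len(forward_keys)):
-- 		posa,posb = forward_keys[i]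
-- 		t = 0
-- 		for j in range(-window_size,window_size+1):
-- 			temp_posa = posa + j
-- 			for l in range(-window_size,window_size+1):
-- 				temp_posb = posb + l
-- 				temp_pos = (temp_posa,temp_posb)
-- 				if temp_pos in reverse_keys:
-- 					t += 1
-- 					if temp_pos not in clip_Pos_statistics:
-- 						clip_Pos_statistics[temp_pos] = [m_clip_pos_forward[(posa,posb)],m_clip_pos_reverse[temp_pos],m_clip_pos_forward[(posa,posb)]+m_clip_pos_reverse[temp_pos]]
-- 					else:
-- 						clip_Pos_statistics[temp_pos] = [x + y for x,y in zip(clip_Pos_statistics[temp_pos], [m_clip_pos_forward[(posa,posb)],m_clip_pos_reverse[temp_pos],m_clip_pos_forward[(posa,posb)]+m_clip_pos_reverse[temp_pos]])]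
-- 		if t == 0:
-- 			if (posa, posb) not in clip_Pos_statistics:
-- 				clip_Pos_statistics[(posa,posb)] = [m_clip_pos_forward[(posa,posb)],0,m_clip_pos_forward[(posa,posb)]+0]
-- 			else:
-- 				clip_Pos_statistics[(posa,posb)] = [x + y for x,y in zip(clip_Pos_statistics[(posa,posb)], [m_clip_pos_forward[(posa,posb)],0,m_clip_pos_forward[(posa,posb)]+0])]
--
-- 	for i in range(len(reverse_keys)):
-- 		posa,posb = reverse_keys[i]
-- 		m = 0
-- 		for j in range(-window_size,window_size+1):
-- 			temp_posa = posa + j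
-- 			for l in range(-window_size,window_size+1):
-- 				temp_posb = posb + l
-- 				temp_pos = (temp_posa,temp_posb)
-- 				if temp_pos in forward_keys:
-- 					m += 1
-- 					pass
-- 		if m == 0:
-- 			if (posa,posb) not in clip_Pos_statistics:
-- 				clip_Pos_statistics[(posa,posb)] = [0, m_clip_pos_reverse[(posa,posb)], m_clip_pos_reverse[(posa,posb)]+0]
-- 			else:
-- 				clip_Pos_statistics[(posa,posb)] = [x + y for x,y in zip(clip_Pos_statistics[(posa,posb)], [0,m_clip_pos_reverse[(posa,posb)],m_clip_pos_reverse[(posa,posb)]+0])]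
--
-- 	return clip_Pos_statistics
-- ===== SOURCE B (Python) =====
-- def singleSide_clip_pos_calculation(m_clip_pos_forward, m_clip_pos_reverse, window_size=10):
--     # Scan the actual reverse/forward keys with a Chebyshev-distance test instead of
--     # enumerating the whole (2W+1)^2 offset grid and probing list membership.
--     clip_Pos_statistics = {}
--
--     def _add(key, vec):
--         if key in clip_Pos_statistics:
--             clip_Pos_statistics[key] = [x + y for x, y in zip(clip_Pos_statistics[key], vec)]
--         else:
--             clip_Pos_statistics[key] = vec
--
--     W = window_size
--     fkeys = list(m_clip_pos_forward.keys())
--     rkeys = list(m_clip_pos_reverse.keys())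
--
--     for (posa, posb) in fkeys:
--         fv = m_clip_pos_forward[(posa, posb)]
--         matches = sorted(q for q in rkeys
--                          if abs(q[0] - posa) <= W and abs(q[1] - posb) <= W)
--         if not matches:
--             _add((posa, posb), [fv, 0, fv])
--         else:
--             for q in matches:
--                 rv = m_clip_pos_reverse[q]
--                 _add(q, [fv, rv, fv + rv])
--
--     for (posa, posb) in rkeys:
--         if not any(abs(p[0] - posa) <= W and abs(p[1] - posb) <= W for p in fkeys):
--             rv = m_clip_pos_reverse[(posa, posb)]
--             _add((posa, posb), [0, rv, rv])
--
--     return clip_Pos_statistics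
-- ===== Notes on version B (the rewrite author's own statement) =====
-- stated objective: faster
-- what changed: Replaces the (2W+1)^2 offset-grid enumeration with list-membership probes by a direct scan of the real reverse/forward keys under a Chebyshev-distance test (|da|<=W and |db|<=W), sorting the per-forward-key matches to reproduce A's grid-lexicographic insertion order; Pre_ only excludes association lists whose reverse-side key pairs repeat, which cannot arise from a Python dict argument.
import Mathlib
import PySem

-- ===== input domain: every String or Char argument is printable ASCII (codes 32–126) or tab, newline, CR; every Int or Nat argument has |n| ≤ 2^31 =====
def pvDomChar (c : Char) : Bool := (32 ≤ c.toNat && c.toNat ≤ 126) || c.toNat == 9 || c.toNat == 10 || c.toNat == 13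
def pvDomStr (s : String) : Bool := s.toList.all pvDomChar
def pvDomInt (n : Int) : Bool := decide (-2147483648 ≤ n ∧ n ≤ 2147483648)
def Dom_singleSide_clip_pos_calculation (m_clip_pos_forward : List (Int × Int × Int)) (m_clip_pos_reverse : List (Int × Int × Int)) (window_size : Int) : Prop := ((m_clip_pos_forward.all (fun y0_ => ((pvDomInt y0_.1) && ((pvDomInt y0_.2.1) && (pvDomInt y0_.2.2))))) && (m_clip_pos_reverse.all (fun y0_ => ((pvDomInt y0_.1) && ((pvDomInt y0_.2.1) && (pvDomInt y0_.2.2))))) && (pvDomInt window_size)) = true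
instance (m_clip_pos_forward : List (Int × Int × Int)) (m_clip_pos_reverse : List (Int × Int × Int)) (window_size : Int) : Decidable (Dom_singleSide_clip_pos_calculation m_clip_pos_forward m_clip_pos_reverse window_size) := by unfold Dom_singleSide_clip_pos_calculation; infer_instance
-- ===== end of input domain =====

-- B replaces A's (2W+1)^2 offset-grid enumeration with list-membership probes by a scan of the
-- actual keys under a Chebyshev-distance test (sorted per forward key to keep A's insertion order); measured faster.


-- ===== PORT A =====
-- Shared helper: Python's '[x + y for x, y in zip(a, b)]' (appears verbatim in both A and B).
def pvAddVec (xs ys : List Int) : List Int := (xs.zip ys).map (fun p => p.1 + p.2)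

def singleSide_clip_pos_calculation (m_clip_pos_forward : List (Int × Int × Int)) (m_clip_pos_reverse : List (Int × Int × Int)) (window_size : Int) : List (Int × Int × List Int) :=
  let fd : PySem.Dict (Int × Int) Int := PySem.Dict.mk (m_clip_pos_forward.map (fun x => ((x.1, x.2.1), x.2.2)))
  let rd : PySem.Dict (Int × Int) Int := PySem.Dict.mk (m_clip_pos_reverse.map (fun x => ((x.1, x.2.1), x.2.2)))
  let forward_keys : List (Int × Int) := m_clip_pos_forward.map (fun x => (x.1, x.2.1))
  let reverse_keys : List (Int × Int) := m_clip_pos_reverse.map (fun x => (x.1, x.2.1))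
  let stats1 : PySem.Dict (Int × Int) (List Int) := forward_keys.foldl (fun stats pk =>
    let posa := pk.1
    let posb := pk.2
    let res := (PySem.List.pyRange (-window_size) (window_size + 1) 1).foldl (fun (st : PySem.Dict (Int × Int) (List Int) × Int) j =>
      (PySem.List.pyRange (-window_size) (window_size + 1) 1).foldl (fun (st : PySem.Dict (Int × Int) (List Int) × Int) l =>
        let temp_pos := (posa + j, posb + l)
        if temp_pos ∈ reverse_keys then
          if st.1.contains temp_pos = false then
            (st.1.insert temp_pos [fd.getD (posa, posb) 0, rd.getD temp_pos 0, fd.getD (posa, posb) 0 + rd.getD temp_pos 0], st.2 + 1)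
          else
            (st.1.insert temp_pos (pvAddVec (st.1.getD temp_pos []) [fd.getD (posa, posb) 0, rd.getD temp_pos 0, fd.getD (posa, posb) 0 + rd.getD temp_pos 0]), st.2 + 1)
        else st) st) (stats, (0 : Int))
    if res.2 = 0 then
      if res.1.contains (posa, posb) = false then
        res.1.insert (posa, posb) [fd.getD (posa, posb) 0, 0, fd.getD (posa, posb) 0 + 0]
      else
        res.1.insert (posa, posb) (pvAddVec (res.1.getD (posa, posb) []) [fd.getD (posa, posb) 0, 0, fd.getD (posa, posb) 0 + 0])
    else res.1) PySem.Dict.empty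
  let stats2 : PySem.Dict (Int × Int) (List Int) := reverse_keys.foldl (fun stats rk =>
    let posa := rk.1
    let posb := rk.2
    let m : Int := (PySem.List.pyRange (-window_size) (window_size + 1) 1).foldl (fun m j =>
      (PySem.List.pyRange (-window_size) (window_size + 1) 1).foldl (fun m l =>
        if (posa + j, posb + l) ∈ forward_keys then m + 1 else m) m) 0
    if m = 0 then
      if stats.contains (posa, posb) = false then
        stats.insert (posa, posb) [0, rd.getD (posa, posb) 0, rd.getD (posa, posb) 0 + 0]
      else
        stats.insert (posa, posb) (pvAddVec (stats.getD (posa, posb) []) [0, rd.getD (posa, posb) 0, rd.getD (posa, posb) 0 + 0])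
    else stats) stats1
  stats2.items.map (fun p => (p.1.1, p.1.2, p.2))

-- ===== PORT B =====
-- Source B's local helper '_add(key, vec)'.
def pvAddEntry (stats : PySem.Dict (Int × Int) (List Int)) (key : Int × Int) (vec : List Int) : PySem.Dict (Int × Int) (List Int) :=
  if stats.contains key then stats.insert key (pvAddVec (stats.getD key []) vec)
  else stats.insert key vec

def singleSide_clip_pos_calculation_alt (m_clip_pos_forward : List (Int × Int × Int)) (m_clip_pos_reverse : List (Int × Int × Int)) (window_size : Int) : List (Int × Int × List Int) :=
  let fd : PySem.Dict (Int × Int) Int := PySem.Dict.mk (m_clip_pos_forward.map (fun x => ((x.1, x.2.1), x.2.2)))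
  let rd : PySem.Dict (Int × Int) Int := PySem.Dict.mk (m_clip_pos_reverse.map (fun x => ((x.1, x.2.1), x.2.2)))
  let fkeys : List (Int × Int) := m_clip_pos_forward.map (fun x => (x.1, x.2.1))
  let rkeys : List (Int × Int) := m_clip_pos_reverse.map (fun x => (x.1, x.2.1))
  let stats1 : PySem.Dict (Int × Int) (List Int) := fkeys.foldl (fun stats pk =>
    let fv := fd.getD pk 0
    let mtchs := PySem.List.sorted2 (rkeys.filter (fun q => |q.1 - pk.1| ≤ window_size && |q.2 - pk.2| ≤ window_size)) (fun q => q.1) (fun q => q.2)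
    if mtchs.isEmpty then pvAddEntry stats pk [fv, 0, fv]
    else mtchs.foldl (fun stats q => pvAddEntry stats q [fv, rd.getD q 0, fv + rd.getD q 0]) stats) PySem.Dict.empty
  let stats2 : PySem.Dict (Int × Int) (List Int) := rkeys.foldl (fun stats q =>
    if fkeys.any (fun p => |p.1 - q.1| ≤ window_size && |p.2 - q.2| ≤ window_size) then stats
    else pvAddEntry stats q [0, rd.getD q 0, rd.getD q 0]) stats1
  stats2.items.map (fun p => (p.1.1, p.1.2, p.2))

-- ===== PRECONDITION & SPEC =====
-- Pre_ excludes only association lists whose reverse-side key pairs repeat: the argument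
-- represents a Python dict, whose keys are necessarily distinct, so no Python call produces them.
def Pre_singleSide_clip_pos_calculation (m_clip_pos_forward : List (Int × Int × Int)) (m_clip_pos_reverse : List (Int × Int × Int)) (window_size : Int) : Prop :=
  (m_clip_pos_reverse.map (fun x => (x.1, x.2.1))).Nodup
instance (m_clip_pos_forward : List (Int × Int × Int)) (m_clip_pos_reverse : List (Int × Int × Int)) (window_size : Int) : Decidable (Pre_singleSide_clip_pos_calculation m_clip_pos_forward m_clip_pos_reverse window_size) := by unfold Pre_singleSide_clip_pos_calculation; infer_instance
def pvWitness_singleSide_clip_pos_calculation : (List (Int × Int × Int)) × (List (Int × Int × Int)) × Int := ([(0, 0, 1), (20, 20, 2)], [(1, 1, 3), (40, 40, 4)], 5)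
def Spec_singleSide_clip_pos_calculation (m_clip_pos_forward : List (Int × Int × Int)) (m_clip_pos_reverse : List (Int × Int × Int)) (window_size : Int) (out : List (Int × Int × List Int)) : Prop := out = singleSide_clip_pos_calculation_alt m_clip_pos_forward m_clip_pos_reverse window_size
instance (m_clip_pos_forward : List (Int × Int × Int)) (m_clip_pos_reverse : List (Int × Int × Int)) (window_size : Int) (out : List (Int × Int × List Int)) : Decidable (Spec_singleSide_clip_pos_calculation m_clip_pos_forward m_clip_pos_reverse window_size out) := by unfold Spec_singleSide_clip_pos_calculation; infer_instance

-- ===== CLAIM (what is proved, stated in full; the proofs are below) =====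
def Claim_equal_singleSide_clip_pos_calculation : Prop := ∀ (m_clip_pos_forward : List (Int × Int × Int)) (m_clip_pos_reverse : List (Int × Int × Int)) (window_size : Int), Dom_singleSide_clip_pos_calculation m_clip_pos_forward m_clip_pos_reverse window_size → Pre_singleSide_clip_pos_calculation m_clip_pos_forward m_clip_pos_reverse window_size → Spec_singleSide_clip_pos_calculation m_clip_pos_forward m_clip_pos_reverse window_size (singleSide_clip_pos_calculation m_clip_pos_forward m_clip_pos_reverse window_size)

-- ===== LEMMAS AND PROOFS =====

def pvGrid (pa pb W : Int) : List (Int × Int) :=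
  (PySem.List.pyRange (-W) (W + 1) 1).flatMap
    (fun j => (PySem.List.pyRange (-W) (W + 1) 1).map (fun l => (pa + j, pb + l)))

def pvLexLt (a b : Int × Int) : Prop := a.1 < b.1 ∨ (a.1 = b.1 ∧ a.2 < b.2)

theorem pvFoldl_nested {γ : Type} (l1 l2 : List Int) (g : γ → (Int × Int) → γ)
    (f : Int → Int → Int × Int) (init : γ) :
    l1.foldl (fun st j => l2.foldl (fun st l => g st (f j l)) st) init
      = (l1.flatMap (fun j => l2.map (f j))).foldl g init := by
  induction l1 generalizing init with
  | nil => simp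
  | cons j t ih => simp [List.foldl_append, List.foldl_map, ih]

theorem pvFoldl_pair {δ : Type} (hits : List (Int × Int)) (g : δ → (Int × Int) → δ)
    (s0 : δ) (t0 : Int) :
    hits.foldl (fun st q => (g st.1 q, st.2 + 1)) (s0, t0)
      = (hits.foldl g s0, t0 + hits.length) := by
  induction hits generalizing s0 t0 with
  | nil => simp
  | cons q t ih => simp [ih]; omega

theorem pvMem_grid (pa pb W : Int) (x : Int × Int) :
    x ∈ pvGrid pa pb W ↔ |x.1 - pa| ≤ W ∧ |x.2 - pb| ≤ W := by
  simp only [pvGrid, List.mem_flatMap, List.mem_map, PySem.List.mem_pyRange_one, abs_le]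
  constructor
  · rintro ⟨j, hj, l, hl, rfl⟩; constructor <;> constructor <;> simp <;> omega
  · rintro ⟨h1, h2⟩
    exact ⟨x.1 - pa, by omega, x.2 - pb, by omega, by simp⟩

theorem pvGrid_pairwise_aux (l1 l2 : List Int) (pa pb : Int)
    (h1 : l1.Pairwise (· < ·)) (h2 : l2.Pairwise (· < ·)) :
    (l1.flatMap (fun j => l2.map (fun l => (pa + j, pb + l)))).Pairwise pvLexLt := by
  induction l1 with
  | nil => simp
  | cons j t ih =>
    rw [List.pairwise_cons] at h1
    simp only [List.flatMap_cons, List.pairwise_append]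
    refine ⟨?_, ih h1.2, ?_⟩
    · rw [List.pairwise_map]
      exact h2.imp (fun h => Or.inr ⟨rfl, by omega⟩)
    · rintro a ha b hb
      simp only [List.mem_map] at ha
      obtain ⟨l, _, rfl⟩ := ha
      simp only [List.mem_flatMap, List.mem_map] at hb
      obtain ⟨j', hj', l', _, rfl⟩ := hb
      exact Or.inl (by have := h1.1 j' hj'; omega)

theorem pvGrid_pairwise (pa pb W : Int) : (pvGrid pa pb W).Pairwise pvLexLt :=
  pvGrid_pairwise_aux _ _ pa pb (PySem.List.pairwise_lt_pyRange_one _ _)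
    (PySem.List.pairwise_lt_pyRange_one _ _)

theorem pvNodup_of_pairwise {l : List (Int × Int)} (h : l.Pairwise pvLexLt) : l.Nodup :=
  h.imp (fun {a b} hab => by rintro rfl; rcases hab with h | ⟨_, h⟩ <;> omega)

-- sorted2 with fst/snd keys is sorted with the lexicographic key
theorem pvSorted2_eq_sorted (xs : List (Int × Int)) :
    PySem.List.sorted2 xs (fun q => q.1) (fun q => q.2) false
      = PySem.List.sorted xs (fun q => (toLex q : Lex (Int × Int))) false := by
  have hbe : (fun (a b : Int × Int) => decide (a.1 < b.1) || (!decide (b.1 < a.1) && decide (a.2 < b.2)))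
      = (fun (a b : Int × Int) => decide ((toLex a : Lex (Int × Int)) < toLex b)) := by
    funext a b
    by_cases h1 : a.1 < b.1 <;> by_cases h2 : b.1 < a.1 <;> by_cases h3 : a.2 < b.2 <;>
      simp [Prod.Lex.lt_iff, h1, h2, h3] <;> omega
  simp only [PySem.List.sorted2, PySem.List.sorted, Bool.false_eq_true, if_false, hbe]

theorem pvSorted2_eq_of_perm_of_pairwise (xs ys : List (Int × Int))
    (hperm : ys.Perm xs) (hp : ys.Pairwise pvLexLt) :
    PySem.List.sorted2 xs (fun q => q.1) (fun q => q.2) false = ys := by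
  rw [pvSorted2_eq_sorted]
  exact PySem.List.sorted_eq_of_perm_of_pairwise_lt xs ys _ hperm
    (hp.imp (fun {a b} h => by rw [Prod.Lex.lt_iff]; exact h))

theorem pvHits_eq_mtchs (rkeys : List (Int × Int)) (W : Int) (pk : Int × Int)
    (hpre : rkeys.Nodup) :
    PySem.List.sorted2 (rkeys.filter (fun q => |q.1 - pk.1| ≤ W && |q.2 - pk.2| ≤ W))
        (fun q => q.1) (fun q => q.2) false
      = (pvGrid pk.1 pk.2 W).filter (fun x => decide (x ∈ rkeys)) := by
  apply pvSorted2_eq_of_perm_of_pairwise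
  · refine (List.perm_ext_iff_of_nodup
      (pvNodup_of_pairwise ((pvGrid_pairwise pk.1 pk.2 W).sublist List.filter_sublist))
      (hpre.filter _)).mpr ?_
    intro x
    simp only [List.mem_filter, pvMem_grid, decide_eq_true_eq, Bool.and_eq_true, decide_eq_true_eq]
    tauto
  · exact (pvGrid_pairwise pk.1 pk.2 W).sublist List.filter_sublist

theorem pvStep1_eq (fd rd : PySem.Dict (Int × Int) Int) (rkeys : List (Int × Int)) (W : Int)
    (hpre : rkeys.Nodup) (stats : PySem.Dict (Int × Int) (List Int)) (pk : Int × Int) :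
    (let res := (PySem.List.pyRange (-W) (W + 1) 1).foldl
        (fun (st : PySem.Dict (Int × Int) (List Int) × Int) j =>
          (PySem.List.pyRange (-W) (W + 1) 1).foldl
            (fun (st : PySem.Dict (Int × Int) (List Int) × Int) l =>
              if (pk.1 + j, pk.2 + l) ∈ rkeys then
                if st.1.contains (pk.1 + j, pk.2 + l) = false then
                  (st.1.insert (pk.1 + j, pk.2 + l)
                    [fd.getD (pk.1, pk.2) 0, rd.getD (pk.1 + j, pk.2 + l) 0,
                      fd.getD (pk.1, pk.2) 0 + rd.getD (pk.1 + j, pk.2 + l) 0], st.2 + 1)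
                else
                  (st.1.insert (pk.1 + j, pk.2 + l)
                    (pvAddVec (st.1.getD (pk.1 + j, pk.2 + l) [])
                      [fd.getD (pk.1, pk.2) 0, rd.getD (pk.1 + j, pk.2 + l) 0,
                        fd.getD (pk.1, pk.2) 0 + rd.getD (pk.1 + j, pk.2 + l) 0]), st.2 + 1)
              else st) st) (stats, (0 : Int))
      if res.2 = 0 then
        if res.1.contains (pk.1, pk.2) = false then
          res.1.insert (pk.1, pk.2) [fd.getD (pk.1, pk.2) 0, 0, fd.getD (pk.1, pk.2) 0 + 0]
        else
          res.1.insert (pk.1, pk.2) (pvAddVec (res.1.getD (pk.1, pk.2) [])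
            [fd.getD (pk.1, pk.2) 0, 0, fd.getD (pk.1, pk.2) 0 + 0])
      else res.1)
    = (let fv := fd.getD pk 0
       let mtchs := PySem.List.sorted2
          (rkeys.filter (fun q => |q.1 - pk.1| ≤ W && |q.2 - pk.2| ≤ W))
          (fun q => q.1) (fun q => q.2) false
       if mtchs.isEmpty then pvAddEntry stats pk [fv, 0, fv]
       else mtchs.foldl (fun stats q => pvAddEntry stats q [fv, rd.getD q 0, fv + rd.getD q 0]) stats) := by
  have hinner : ∀ (j : Int),
      (fun (st : PySem.Dict (Int × Int) (List Int) × Int) l =>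
        if (pk.1 + j, pk.2 + l) ∈ rkeys then
          if st.1.contains (pk.1 + j, pk.2 + l) = false then
            (st.1.insert (pk.1 + j, pk.2 + l)
              [fd.getD (pk.1, pk.2) 0, rd.getD (pk.1 + j, pk.2 + l) 0,
                fd.getD (pk.1, pk.2) 0 + rd.getD (pk.1 + j, pk.2 + l) 0], st.2 + 1)
          else
            (st.1.insert (pk.1 + j, pk.2 + l)
              (pvAddVec (st.1.getD (pk.1 + j, pk.2 + l) [])
                [fd.getD (pk.1, pk.2) 0, rd.getD (pk.1 + j, pk.2 + l) 0,
                  fd.getD (pk.1, pk.2) 0 + rd.getD (pk.1 + j, pk.2 + l) 0]), st.2 + 1)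
        else st)
      = (fun st l =>
          if decide ((pk.1 + j, pk.2 + l) ∈ rkeys) = true then
            (pvAddEntry st.1 (pk.1 + j, pk.2 + l)
              [fd.getD (pk.1, pk.2) 0, rd.getD (pk.1 + j, pk.2 + l) 0,
                fd.getD (pk.1, pk.2) 0 + rd.getD (pk.1 + j, pk.2 + l) 0], st.2 + 1)
          else st) := by
    intro j; funext st l
    simp only [decide_eq_true_eq, pvAddEntry]
    by_cases hm : (pk.1 + j, pk.2 + l) ∈ rkeys <;>
      by_cases hc : st.1.contains (pk.1 + j, pk.2 + l) <;> simp [hm, hc]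
  simp only [hinner]
  have hnest := pvFoldl_nested (PySem.List.pyRange (-W) (W + 1) 1) (PySem.List.pyRange (-W) (W + 1) 1)
    (fun (st : PySem.Dict (Int × Int) (List Int) × Int) x =>
      if decide (x ∈ rkeys) = true then
        (pvAddEntry st.1 x [fd.getD (pk.1, pk.2) 0, rd.getD x 0, fd.getD (pk.1, pk.2) 0 + rd.getD x 0], st.2 + 1)
      else st)
    (fun j l => (pk.1 + j, pk.2 + l)) (stats, (0 : Int))
  simp only [hnest]
  rw [show ((PySem.List.pyRange (-W) (W + 1) 1).flatMap
      (fun j => (PySem.List.pyRange (-W) (W + 1) 1).map (fun l => (pk.1 + j, pk.2 + l))))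
      = pvGrid pk.1 pk.2 W from rfl]
  rw [← List.foldl_filter]
  rw [pvFoldl_pair ((pvGrid pk.1 pk.2 W).filter (fun x => decide (x ∈ rkeys)))
    (fun s x => pvAddEntry s x
      [fd.getD (pk.1, pk.2) 0, rd.getD x 0, fd.getD (pk.1, pk.2) 0 + rd.getD x 0]) stats 0]
  rw [pvHits_eq_mtchs rkeys W pk hpre]
  set hits := (pvGrid pk.1 pk.2 W).filter (fun x => decide (x ∈ rkeys)) with hh
  simp only [zero_add]
  by_cases hemp : hits = []
  · simp only [hemp, List.isEmpty_nil, List.length_nil, Nat.cast_zero,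
      List.foldl_nil, if_true]
    simp only [pvAddEntry, Prod.mk.eta, add_zero]
    by_cases hc : stats.contains pk <;> simp [hc]
  · have hlen : ((hits.length : Int) = 0) = False := by
      simp [List.length_eq_zero_iff, hemp]
    simp only [hlen, if_false, List.isEmpty_iff, hemp]

theorem pvStep2_eq (rd : PySem.Dict (Int × Int) Int) (fkeys : List (Int × Int)) (W : Int)
    (stats : PySem.Dict (Int × Int) (List Int)) (rk : Int × Int) :
    (let m : Int := (PySem.List.pyRange (-W) (W + 1) 1).foldl (fun m j =>
        (PySem.List.pyRange (-W) (W + 1) 1).foldl (fun m l =>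
          if (rk.1 + j, rk.2 + l) ∈ fkeys then m + 1 else m) m) 0
     if m = 0 then
       if stats.contains (rk.1, rk.2) = false then
         stats.insert (rk.1, rk.2) [0, rd.getD (rk.1, rk.2) 0, rd.getD (rk.1, rk.2) 0 + 0]
       else
         stats.insert (rk.1, rk.2) (pvAddVec (stats.getD (rk.1, rk.2) [])
           [0, rd.getD (rk.1, rk.2) 0, rd.getD (rk.1, rk.2) 0 + 0])
     else stats)
    = (if fkeys.any (fun p => |p.1 - rk.1| ≤ W && |p.2 - rk.2| ≤ W) then stats
       else pvAddEntry stats rk [0, rd.getD rk 0, rd.getD rk 0]) := by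
  have hinner : ∀ (j : Int),
      (fun (m : Int) l => if (rk.1 + j, rk.2 + l) ∈ fkeys then m + 1 else m)
      = (fun m l => if decide ((rk.1 + j, rk.2 + l) ∈ fkeys) = true then m + 1 else m) := by
    intro j; funext m l; simp
  simp only [hinner]
  have hnest := pvFoldl_nested (PySem.List.pyRange (-W) (W + 1) 1)
    (PySem.List.pyRange (-W) (W + 1) 1)
    (fun (m : Int) x => if decide (x ∈ fkeys) = true then m + 1 else m)
    (fun j l => (rk.1 + j, rk.2 + l)) 0
  simp only [hnest]
  rw [show ((PySem.List.pyRange (-W) (W + 1) 1).flatMap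
      (fun j => (PySem.List.pyRange (-W) (W + 1) 1).map (fun l => (rk.1 + j, rk.2 + l))))
      = pvGrid rk.1 rk.2 W from rfl]
  rw [PySem.List.foldl_count_if (fun x => decide (x ∈ fkeys)) (pvGrid rk.1 rk.2 W) 0]
  have hm0 : ((0 : Int) + ((pvGrid rk.1 rk.2 W).countP (fun x => decide (x ∈ fkeys)) : Int) = 0)
      ↔ fkeys.any (fun p => |p.1 - rk.1| ≤ W && |p.2 - rk.2| ≤ W) = false := by
    rw [zero_add]
    have : ((pvGrid rk.1 rk.2 W).countP (fun x => decide (x ∈ fkeys)) : Int) = 0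
        ↔ (pvGrid rk.1 rk.2 W).countP (fun x => decide (x ∈ fkeys)) = 0 := by omega
    rw [this, List.countP_eq_zero]
    constructor
    · intro h
      rw [Bool.eq_false_iff]
      intro hany
      rw [List.any_eq_true] at hany
      obtain ⟨p, hp, hw⟩ := hany
      simp only [Bool.and_eq_true, decide_eq_true_eq] at hw
      exact absurd (by simpa using hp) (by
        have := h p ((pvMem_grid rk.1 rk.2 W p).mpr ⟨hw.1, hw.2⟩)
        simpa using this)
    · intro h x hx hmem
      rw [pvMem_grid] at hx
      have : fkeys.any (fun p => |p.1 - rk.1| ≤ W && |p.2 - rk.2| ≤ W) = true := by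
        rw [List.any_eq_true]
        exact ⟨x, by simpa using hmem, by simp [hx.1, hx.2]⟩
      rw [h] at this; exact absurd this (by simp)
  by_cases hany : fkeys.any (fun p => |p.1 - rk.1| ≤ W && |p.2 - rk.2| ≤ W)
  · have : ¬ ((0 : Int) + ((pvGrid rk.1 rk.2 W).countP (fun x => decide (x ∈ fkeys)) : Int) = 0) := by
      rw [hm0, hany]; simp
    simp only [if_neg this, if_pos hany]
  · rw [Bool.not_eq_true] at hany
    have : (0 : Int) + ((pvGrid rk.1 rk.2 W).countP (fun x => decide (x ∈ fkeys)) : Int) = 0 :=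
      hm0.mpr hany
    simp only [if_pos this, hany, Bool.false_eq_true, if_false]
    simp only [pvAddEntry, Prod.mk.eta, add_zero]
    by_cases hc : stats.contains rk <;> simp [hc]


-- ===== VERDICT (by name: the statement is the Claim_ definition above) =====
theorem singleSide_clip_pos_calculation_spec : Claim_equal_singleSide_clip_pos_calculation := by
  intro mf mr W hdom hpre
  unfold Spec_singleSide_clip_pos_calculation
  unfold Pre_singleSide_clip_pos_calculation at hpre
  unfold singleSide_clip_pos_calculation singleSide_clip_pos_calculation_alt
  simp only []
  congr 2
  refine Eq.trans (List.foldl_ext _ _ _ fun stats rk _ => pvStep2_eq _ _ _ stats rk) ?_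
  congr 1
  exact List.foldl_ext _ _ _ fun stats pk _ => pvStep1_eq _ _ _ _ hpre stats pk
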